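-- pv_equiv track=rewrite | github.com/gerssivaldosantos/MeuGuru | projeto004/laboratorio.py | encontrar_repetidos
-- ===== SOURCE A (Python) =====
-- def encontrar_repetidos(jogadas):
-- 	""" Recebe uma lista de jogadas e conta
-- 	quantas series de numeros adjacentes iguais
-- 	ocorrem nas faces dos dados jogados
--
-- 	list -> int """
-- 	series = 0
-- 	inicio_serie = None
--
-- 	for i in range(len(jogadas)-1):
-- 		numero = jogadas[i]
-- 		prox_num = jogadas[i + 1]
--
-- 		if numero == prox_num:
-- 			if numero != inicio_serie:
-- 				inicio_serie = numero
-- 				series += 1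
-- 		if numero != inicio_serie:
-- 			inicio_serie = numero
--
-- 	return series
-- ===== SOURCE B (Python) =====
-- from itertools import groupby
--
-- def encontrar_repetidos(jogadas):
-- 	""" list -> int: counts maximal runs of adjacent equal faces of length >= 2 """
-- 	return sum(1 for _, g in groupby(jogadas) if sum(1 for _ in g) >= 2)
-- ===== Notes on version B (the rewrite author's own statement) =====
-- stated objective: idiomatic
-- what changed: Replaces A's single-pass sentinel (inicio_serie) state machine over adjacent index pairs with an itertools.groupby partition into maximal runs followed by counting the runs of length >= 2.
import Mathlib
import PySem

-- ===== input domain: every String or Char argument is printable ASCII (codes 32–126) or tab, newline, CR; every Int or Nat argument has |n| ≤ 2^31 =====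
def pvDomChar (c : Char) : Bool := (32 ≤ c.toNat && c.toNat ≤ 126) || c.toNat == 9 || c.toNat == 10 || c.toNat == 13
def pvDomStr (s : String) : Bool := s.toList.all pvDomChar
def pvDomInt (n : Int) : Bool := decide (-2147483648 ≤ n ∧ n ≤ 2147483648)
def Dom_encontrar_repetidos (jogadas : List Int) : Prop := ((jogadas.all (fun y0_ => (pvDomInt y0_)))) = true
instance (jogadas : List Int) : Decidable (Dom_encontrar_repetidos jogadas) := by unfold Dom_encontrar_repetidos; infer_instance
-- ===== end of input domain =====

-- B replaces A's sentinel state machine over adjacent index pairs by a groupby-style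
-- partition into maximal runs followed by counting the runs of length ≥ 2 (objective: idiomatic).

-- ===== PORT A =====
-- literal port of A's index loop; indices i and i+1 are always in range, so pyGetD's default is never used
def encontrar_repetidos (jogadas : List Int) : Int :=
  (PySem.List.pyRange 0 (PySem.List.len jogadas - 1) 1).foldl
    (fun (st : Int × Option Int) i =>
      let numero := PySem.List.pyGetD jogadas i 0
      let prox_num := PySem.List.pyGetD jogadas (i + 1) 0
      let st :=
        if numero == prox_num then
          (if st.2 ≠ some numero then (st.1 + 1, some numero) else st)
        else st
      if st.2 ≠ some numero then (st.1, some numero) else st)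
    (0, none) |>.1

-- ===== PORT B =====
-- itertools.groupby: split into the maximal runs of adjacent equal values
def pyGroupRuns (xs : List Int) : List (List Int) :=
  match xs with
  | [] => []
  | a :: t => (a :: t.takeWhile (· == a)) :: pyGroupRuns (t.dropWhile (· == a))
termination_by xs.length
decreasing_by exact Nat.lt_succ_of_le (List.length_dropWhile_le _ _)

def encontrar_repetidos_alt (jogadas : List Int) : Int :=
  ((pyGroupRuns jogadas).filter (fun g => 2 ≤ g.length)).length

-- ===== PRECONDITION & SPEC =====
def Spec_encontrar_repetidos (jogadas : List Int) (out : Int) : Prop := out = encontrar_repetidos_alt jogadas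
instance (jogadas : List Int) (out : Int) : Decidable (Spec_encontrar_repetidos jogadas out) := by unfold Spec_encontrar_repetidos; infer_instance

-- ===== CLAIM (what is proved, stated in full; the proofs are below) =====
def Claim_equal_encontrar_repetidos : Prop := ∀ (jogadas : List Int), Dom_encontrar_repetidos jogadas → Spec_encontrar_repetidos jogadas (encontrar_repetidos jogadas)

-- ===== LEMMAS AND PROOFS =====

-- counting function extracted from A's loop: state 'ini' is the sentinel (the previous element)
def gCount : Option Int → List Int → Int
  | _, [] => 0
  | _, [_] => 0
  | ini, a :: b :: t => (if a = b ∧ ini ≠ some a then 1 else 0) + gCount (some a) (b :: t)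

-- A's loop body as a function of the state and the adjacent pair
def stepA (st : Int × Option Int) (p : Int × Int) : Int × Option Int :=
  let st' :=
    if p.1 == p.2 then
      (if st.2 ≠ some p.1 then (st.1 + 1, some p.1) else st)
    else st
  if st'.2 ≠ some p.1 then (st'.1, some p.1) else st'

lemma stepA_eq (s : Int) (ini : Option Int) (a b : Int) :
    stepA (s, ini) (a, b) = (if a = b ∧ ini ≠ some a then s + 1 else s, some a) := by
  simp only [stepA]
  by_cases hab : a = b
  · subst hab
    by_cases hia : ini = some a <;> simp [hia]
  · have hb : (a == b) = false := by simp [hab]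
    by_cases hia : ini = some a <;> simp [hb, hia, hab]

lemma foldl_stepA_pairs : ∀ (xs : List Int) (s : Int) (ini : Option Int),
    ((xs.zip xs.tail).foldl stepA (s, ini)).1 = s + gCount ini xs := by
  intro xs
  induction xs with
  | nil => intro s ini; simp [gCount]
  | cons a t ih =>
    intro s ini
    cases t with
    | nil => simp [gCount]
    | cons b t' =>
      have hz : (a :: b :: t').zip (a :: b :: t').tail
          = (a, b) :: ((b :: t').zip (b :: t').tail) := by simp
      rw [hz, List.foldl_cons, stepA_eq, ih, gCount]
      split_ifs <;> omega

-- A's index loop over range(len-1) is the fold of stepA over the list of adjacent pairs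
lemma foldl_range_pairs : ∀ (xs : List Int) (st : Int × Option Int),
    (List.range (xs.length - 1)).foldl
      (fun st i => stepA st (xs.getD i 0, xs.getD (i + 1) 0)) st
      = (xs.zip xs.tail).foldl stepA st := by
  intro xs
  induction xs with
  | nil => intro st; simp
  | cons a t ih =>
    intro st
    cases t with
    | nil => simp
    | cons b t' =>
      have hlen : (a :: b :: t').length - 1 = (b :: t').length - 1 + 1 := by simp
      have hz : (a :: b :: t').zip (a :: b :: t').tail
          = (a, b) :: ((b :: t').zip (b :: t').tail) := by simp
      rw [hlen, List.range_succ_eq_map, List.foldl_cons, List.foldl_map, hz, List.foldl_cons]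
      simp only [List.getD_cons_zero]
      rw [← ih (stepA st (a, b))]
      exact List.foldl_ext _ _ _ (fun k _ st => by simp)

lemma encontrar_repetidos_eq_gCount (xs : List Int) :
    encontrar_repetidos xs = gCount none xs := by
  have hrange : PySem.List.pyRange 0 (PySem.List.len xs - 1) 1
      = (List.range (xs.length - 1)).map (fun k : Nat => (k : Int)) := by
    rw [PySem.List.pyRange_one]
    have h0 : (PySem.List.len xs - 1 - 0).toNat = xs.length - 1 := by
      simp only [PySem.List.len_eq]
      omega
    rw [h0]
    simp
  have e1 : encontrar_repetidos xs
      = ((List.range (xs.length - 1)).foldl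
          (fun st k => stepA st (xs.getD k 0, xs.getD (k + 1) 0))
          ((0 : Int), (none : Option Int))).1 := by
    unfold encontrar_repetidos
    rw [hrange, List.foldl_map]
    have hfun : ∀ (st : Int × Option Int) (k : Nat),
        stepA st (PySem.List.pyGetD xs (k : Int) 0, PySem.List.pyGetD xs ((k : Int) + 1) 0)
          = stepA st (xs.getD k 0, xs.getD (k + 1) 0) := by
      intro st k
      have hcast : ((k : Int) + 1) = ((k + 1 : Nat) : Int) := by push_cast; ring
      rw [hcast, PySem.List.pyGetD_natCast, PySem.List.pyGetD_natCast]
    congr 1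
    exact List.foldl_ext _ _ _ (fun st k _ => hfun st k)
  rw [e1, foldl_range_pairs, foldl_stepA_pairs]
  omega

-- B's run count
def runCount (xs : List Int) : Int :=
  ((pyGroupRuns xs).filter (fun g => 2 ≤ g.length)).length

-- the first run of xs has length ≥ 2 iff the first two elements of xs are equal
def firstRunLong : List Int → Bool
  | a :: b :: _ => a == b
  | _ => false

lemma runCount_cons_ne (a b : Int) (t : List Int) (h : a ≠ b) :
    runCount (a :: b :: t) = runCount (b :: t) := by
  have hb : (b == a) = false := by simp [Ne.symm h]
  unfold runCount
  rw [pyGroupRuns]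
  simp [hb]

lemma runCount_cons_eq (a : Int) (t : List Int) :
    runCount (a :: a :: t) = runCount (a :: t) + (if firstRunLong (a :: t) then 0 else 1) := by
  unfold runCount
  rw [pyGroupRuns]
  conv_rhs => rw [pyGroupRuns]
  cases t with
  | nil => simp [firstRunLong, List.takeWhile, List.dropWhile, pyGroupRuns]
  | cons c t' =>
    by_cases hc : c = a
    · subst hc
      simp [firstRunLong]
    · have hc' : (c == a) = false := by simp [hc]
      simp [firstRunLong, hc']
      exact fun h' => hc h'.symm

lemma gCount_eq_runCount : ∀ (xs : List Int) (ini : Option Int),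
    gCount ini xs = runCount xs
      - (match xs with
         | a :: _ => if ini = some a ∧ firstRunLong xs then (1 : Int) else 0
         | [] => 0) := by
  intro xs
  induction xs with
  | nil => intro ini; simp [gCount, runCount, pyGroupRuns]
  | cons a t ih =>
    intro ini
    cases t with
    | nil =>
      simp [gCount, runCount, pyGroupRuns, List.takeWhile, List.dropWhile, firstRunLong]
    | cons b t' =>
      rw [gCount, ih (some a)]
      by_cases hab : a = b
      · subst hab
        rw [runCount_cons_eq]
        have h1 : firstRunLong (a :: a :: t') = true := by simp [firstRunLong]
        rw [h1]
        by_cases hia : ini = some a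
        · cases hF : firstRunLong (a :: t')
          · simp [hia]
          · simp [hia]
        · cases hF : firstRunLong (a :: t')
          · simp [hia]
            omega
          · simp [hia]
      · rw [runCount_cons_ne a b t' hab]
        have hb : (a == b) = false := by simp [hab]
        simp only [firstRunLong, hb]
        simp [hab]

-- ===== VERDICT (by name: the statement is the Claim_ definition above) =====
theorem encontrar_repetidos_spec : Claim_equal_encontrar_repetidos := by
  intro xs _
  unfold Spec_encontrar_repetidos
  rw [encontrar_repetidos_eq_gCount, gCount_eq_runCount]
  have halt : encontrar_repetidos_alt xs = runCount xs := rfl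
  rw [halt]
  cases xs with
  | nil => simp
  | cons a t => simp
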